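-- pv_equiv track=rewrite | github.com/Zhanqiu-Guo/Data-Structure-Algorithm | homework/homework3/zg2238_hw3_q3.py | remove_all_evens
-- ===== SOURCE A (Python) =====
-- def remove_all_evens(lst):
--     fei = 0
--     for i in range(len(lst)):
--         if lst[i]%2 == 1:
--             lst[fei],lst[i] = lst[i],lst[fei]
--             fei += 1
--     while fei < len(lst):
--         lst.pop()
--     return lst
-- ===== SOURCE B (Python) =====
-- def remove_all_evens(lst):
--     for i in range(len(lst) - 1, -1, -1):
--         if lst[i] % 2 != 1:
--             del lst[i]
--     return lst
-- ===== Notes on version B (the rewrite author's own statement) =====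
-- stated objective: simpler
-- what changed: Replaces the two-pointer swap partition followed by a pop-truncation loop with a single backward index pass that deletes each even element in place with del.
import Mathlib
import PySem

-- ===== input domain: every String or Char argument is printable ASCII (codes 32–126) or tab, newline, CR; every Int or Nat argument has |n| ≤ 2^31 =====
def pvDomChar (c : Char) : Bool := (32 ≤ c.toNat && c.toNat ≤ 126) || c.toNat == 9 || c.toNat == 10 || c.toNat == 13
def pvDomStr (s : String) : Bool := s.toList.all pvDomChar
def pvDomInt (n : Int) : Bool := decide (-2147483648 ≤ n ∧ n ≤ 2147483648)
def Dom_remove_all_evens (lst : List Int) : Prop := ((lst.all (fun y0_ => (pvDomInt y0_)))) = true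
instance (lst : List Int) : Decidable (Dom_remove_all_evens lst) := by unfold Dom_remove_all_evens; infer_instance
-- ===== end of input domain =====

-- B replaces A's two-pointer swap partition + pop-truncation loop by a single backward
-- pass deleting even elements in place; equivalence is about the RETURN value (both
-- Pythons also mutate the argument list to that same final content).

-- ===== PORT A =====
-- one iteration of A's for-loop: the simultaneous swap lst[fei],lst[i] = lst[i],lst[fei]
def raeStep (st : List Int × Nat) (i : Nat) : List Int × Nat :=
  let l := st.1
  let fei := st.2
  if l.getD i 0 % 2 == 1 then
    ((l.set fei (l.getD i 0)).set i (l.getD fei 0), fei + 1)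
  else st

-- A's 'while fei < len(lst): lst.pop()' loop
def raePop (l : List Int) (fei : Nat) : List Int :=
  if _h : fei < l.length then raePop l.dropLast fei else l
termination_by l.length
decreasing_by simp [List.length_dropLast]; omega

def remove_all_evens (lst : List Int) : List Int :=
  let st := (List.range lst.length).foldl raeStep (lst, 0)
  raePop st.1 st.2

-- ===== PORT B =====
-- for i in range(len(lst)-1, -1, -1): if lst[i] % 2 != 1: del lst[i]
def remove_all_evens_alt (lst : List Int) : List Int :=
  (List.range lst.length).reverse.foldl
    (fun l i => if l.getD i 0 % 2 == 1 then l else l.eraseIdx i) lst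

-- ===== PRECONDITION & SPEC =====
def Spec_remove_all_evens (lst : List Int) (out : List Int) : Prop := out = remove_all_evens_alt lst
instance (lst : List Int) (out : List Int) : Decidable (Spec_remove_all_evens lst out) := by unfold Spec_remove_all_evens; infer_instance

-- ===== CLAIM (what is proved, stated in full; the proofs are below) =====
def Claim_equal_remove_all_evens : Prop := ∀ (lst : List Int), Dom_remove_all_evens lst → Spec_remove_all_evens lst (remove_all_evens lst)

-- ===== LEMMAS AND PROOFS =====

-- B's backward deletion pass computes filter-on-a-prefix
theorem rae_alt_inv (n : Nat) : ∀ (l : List Int), n ≤ l.length →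
    (List.range n).reverse.foldl
      (fun l i => if l.getD i 0 % 2 == 1 then l else l.eraseIdx i) l
    = (l.take n).filter (fun x => x % 2 == 1) ++ l.drop n := by
  induction n with
  | zero => intro l _; simp
  | succ n ih =>
    intro l hn
    have hlt : n < l.length := hn
    rw [List.range_succ, List.reverse_append]
    simp only [List.reverse_singleton, List.singleton_append, List.foldl_cons]
    have hget : l.getD n 0 = l[n] := List.getD_eq_getElem l 0 hlt
    by_cases hodd : l[n] % 2 = 1
    · rw [if_pos (by rw [hget]; simp [hodd])]
      rw [ih l (Nat.le_of_lt hlt)]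
      rw [List.take_succ, List.getElem?_eq_getElem hlt]
      rw [List.drop_eq_getElem_cons hlt]
      have hsingle : List.filter (fun x => x % 2 == 1) [l[n]] = [l[n]] := by simp [hodd]
      rw [Option.toList_some, List.filter_append, hsingle]
      simp only [List.append_assoc, List.singleton_append]
    · rw [if_neg (by rw [hget]; simp [hodd])]
      have herase : l.eraseIdx n = l.take n ++ l.drop (n + 1) :=
        List.eraseIdx_eq_take_drop_succ l n
      have hlen : n ≤ (l.eraseIdx n).length := by
        rw [List.length_eraseIdx_of_lt hlt]; omega
      rw [ih (l.eraseIdx n) hlen]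
      have htk : (l.eraseIdx n).take n = l.take n := by
        rw [herase, List.take_append_of_le_length (by simp [Nat.le_of_lt hlt])]
        simp [List.take_take]
      have hdr : (l.eraseIdx n).drop n = l.drop (n + 1) := by
        rw [herase, List.drop_append_of_le_length (by simp [Nat.le_of_lt hlt])]
        simp [Nat.le_of_lt hlt]
      rw [htk, hdr]
      rw [List.take_succ, List.getElem?_eq_getElem hlt]
      have hsingle : List.filter (fun x => x % 2 == 1) [l[n]] = [] := by simp [hodd]
      rw [Option.toList_some, List.filter_append, hsingle, List.append_nil]

theorem rae_alt_eq_filter (lst : List Int) :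
    remove_all_evens_alt lst = lst.filter (fun x => x % 2 == 1) := by
  unfold remove_all_evens_alt
  rw [rae_alt_inv lst.length lst (Nat.le_refl _)]
  simp

-- reading / writing the position right after a prefix F
theorem rae_getD_at (F t : List Int) (x : Int) (k : Nat) (hk : k = F.length) :
    (F ++ x :: t).getD k 0 = x := by
  subst hk
  induction F with
  | nil => rfl
  | cons a F ih => simpa using ih

theorem rae_set_at (F t : List Int) (x v : Int) (k : Nat) (hk : k = F.length) :
    (F ++ x :: t).set k v = F ++ v :: t := by
  subst hk
  induction F with
  | nil => rfl
  | cons a F ih => simpa using ih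

theorem rae_filter_take_succ (l : List Int) (n : Nat) (hlt : n < l.length) :
    (l.take (n + 1)).filter (fun x => x % 2 == 1)
    = (l.take n).filter (fun x => x % 2 == 1)
      ++ if l[n] % 2 = 1 then [l[n]] else [] := by
  rw [List.take_succ, List.getElem?_eq_getElem hlt, Option.toList_some, List.filter_append]
  by_cases hodd : l[n] % 2 = 1 <;> simp [hodd]

-- one swap iteration, odd element, with displaced evens present: lst[i] goes to slot fei, the even e to slot i
theorem rae_step_odd (F E' t : List Int) (e x : Int) (hx : x % 2 = 1) (n : Nat)
    (hn : n = F.length + 1 + E'.length) :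
    raeStep ((F ++ e :: E') ++ x :: t, F.length) n
      = ((F ++ x :: E') ++ e :: t, F.length + 1) := by
  have hg1 : ((F ++ e :: E') ++ x :: t).getD n 0 = x :=
    rae_getD_at (F ++ e :: E') t x n (by simp [hn]; omega)
  have hg2 : ((F ++ e :: E') ++ x :: t).getD F.length 0 = e := by
    have h := rae_getD_at F (E' ++ x :: t) e F.length rfl
    simpa using h
  have hs1 : ((F ++ e :: E') ++ x :: t).set F.length x = F ++ x :: (E' ++ x :: t) := by
    have h := rae_set_at F (E' ++ x :: t) e x F.length rfl
    simpa using h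
  have hs2 : (F ++ x :: (E' ++ x :: t)).set n e = (F ++ x :: E') ++ e :: t := by
    have h := rae_set_at (F ++ x :: E') t x e n (by simp [hn]; omega)
    simpa using h
  unfold raeStep
  simp only [hg1, hg2]
  rw [if_pos (by simp [hx])]
  rw [hs1, hs2]

-- one swap iteration, odd element, no displaced evens yet (fei = i): lst[i] is swapped with itself
theorem rae_step_odd_nil (F t : List Int) (x : Int) (hx : x % 2 = 1) (n : Nat)
    (hn : n = F.length) :
    raeStep (F ++ x :: t, F.length) n = (F ++ x :: t, F.length + 1) := by
  subst hn
  have hg1 : (F ++ x :: t).getD F.length 0 = x := rae_getD_at F t x F.length rfl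
  have hs : (F ++ x :: t).set F.length x = F ++ x :: t := rae_set_at F t x x F.length rfl
  unfold raeStep
  simp only [hg1]
  rw [if_pos (by simp [hx])]
  rw [hs, hs]

-- one iteration on an even element: state unchanged
theorem rae_step_even (L : List Int) (fei n : Nat) (hx : ¬ L.getD n 0 % 2 = 1) :
    raeStep (L, fei) n = (L, fei) := by
  unfold raeStep
  rw [if_neg (fun h => hx (by simpa using h))]

-- A's partition-loop invariant: the list is (odds of the prefix) ++ (displaced evens) ++ (untouched tail)
theorem rae_loop_inv (lst : List Int) (n : Nat) (hn : n ≤ lst.length) :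
    ∃ E : List Int,
      (List.range n).foldl raeStep (lst, 0)
        = ((lst.take n).filter (fun x => x % 2 == 1) ++ E ++ lst.drop n,
           ((lst.take n).filter (fun x => x % 2 == 1)).length)
      ∧ ((lst.take n).filter (fun x => x % 2 == 1)).length + E.length = n := by
  induction n with
  | zero => exact ⟨[], by simp, by simp⟩
  | succ n ih =>
    obtain ⟨E, hst, hlen⟩ := ih (Nat.le_of_lt hn)
    have hnl : n < lst.length := hn
    set F := (lst.take n).filter (fun x => x % 2 == 1) with hF
    have hdrop : lst.drop n = lst[n] :: lst.drop (n + 1) := List.drop_eq_getElem_cons hnl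
    have hstep : (List.range (n+1)).foldl raeStep (lst, 0)
        = raeStep (F ++ E ++ lst.drop n, F.length) n := by
      rw [List.range_succ, List.foldl_append, hst]; rfl
    by_cases hodd : lst[n] % 2 = 1
    · have hfil : (lst.take (n+1)).filter (fun x => x % 2 == 1) = F ++ [lst[n]] := by
        rw [rae_filter_take_succ lst n hnl, if_pos hodd, hF]
      cases E with
      | nil =>
        have hFn : n = F.length := by simp at hlen; omega
        refine ⟨[], ?_, by simp [hfil]; omega⟩
        rw [hstep, hdrop]
        simp only [List.append_nil]
        rw [rae_step_odd_nil F (lst.drop (n+1)) lst[n] hodd n hFn]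
        rw [hfil]
        simp
      | cons e E' =>
        refine ⟨E' ++ [e], ?_, by simp [hfil]; simp at hlen; omega⟩
        rw [hstep, hdrop]
        rw [rae_step_odd F E' (lst.drop (n+1)) e lst[n] hodd n (by simp at hlen; omega)]
        rw [hfil]
        simp
    · have hfil : (lst.take (n+1)).filter (fun x => x % 2 == 1) = F := by
        rw [rae_filter_take_succ lst n hnl, if_neg hodd, hF, List.append_nil]
      refine ⟨E ++ [lst[n]], ?_, by rw [hfil]; simp; omega⟩
      rw [hstep]
      have hgd : (F ++ E ++ lst.drop n).getD n 0 = lst[n] := by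
        rw [hdrop]
        have h := rae_getD_at (F ++ E) (lst.drop (n+1)) lst[n] n
          (by simp only [List.length_append]; omega)
        simpa using h
      rw [rae_step_even _ _ _ (by rw [hgd]; exact hodd)]
      rw [hfil, hdrop]
      simp

theorem raePop_eq_take (l : List Int) (fei : Nat) (h : fei ≤ l.length) :
    raePop l fei = l.take fei := by
  by_cases hlt : fei < l.length
  · rw [raePop, dif_pos hlt]
    have hdl : fei ≤ l.dropLast.length := by simp [List.length_dropLast]; omega
    rw [raePop_eq_take l.dropLast fei hdl]
    rw [List.dropLast_eq_take, List.take_take]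
    congr 1
    omega
  · rw [raePop, dif_neg hlt]
    have : fei = l.length := by omega
    rw [this, List.take_length]
termination_by l.length
decreasing_by simp [List.length_dropLast]; omega

theorem rae_eq_filter (lst : List Int) :
    remove_all_evens lst = lst.filter (fun x => x % 2 == 1) := by
  unfold remove_all_evens
  obtain ⟨E, hst, hlen⟩ := rae_loop_inv lst lst.length (Nat.le_refl _)
  simp only [List.take_length, List.drop_length, List.append_nil] at hst hlen
  simp only [hst]
  rw [raePop_eq_take _ _ (by simp)]
  rw [List.take_append_of_le_length (Nat.le_refl _), List.take_length]

-- ===== VERDICT (by name: the statement is the Claim_ definition above) =====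
theorem remove_all_evens_spec : Claim_equal_remove_all_evens := by
  intro lst _
  unfold Spec_remove_all_evens
  rw [rae_eq_filter, rae_alt_eq_filter]
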